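-- pv_equiv track=rewrite | github.com/anup1903/HIS-EMR | src/aegisforge/auth/providers.py | resolve_role_from_groups
-- ===== SOURCE A (Python) =====
-- DEFAULT_GROUP_ROLE_MAP: dict[str, str] = {
--     "aegisforge-viewers": "viewer",
--     "aegisforge-operators": "operator",
--     "aegisforge-admins": "admin",
--     "aegisforge-super-admins": "super-admin",
-- }
--
-- def resolve_role_from_groups(
--     groups: list[str],
--     group_role_map: dict[str, str] | None = None,
-- ) -> str:
--     """Resolve the highest role from a user's IdP group memberships."""
--     mapping = group_role_map or DEFAULT_GROUP_ROLE_MAP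
--     role_hierarchy = {"viewer": 0, "operator": 1, "admin": 2, "super-admin": 3}
--     highest_role = "viewer"
--
--     for group in groups:
--         role = mapping.get(group)
--         if role and role_hierarchy.get(role, -1) > role_hierarchy.get(highest_role, -1):
--             highest_role = role
--
--     return highest_role
-- ===== SOURCE B (Python) =====
-- DEFAULT_GROUP_ROLE_MAP: dict[str, str] = {
--     "aegisforge-viewers": "viewer",
--     "aegisforge-operators": "operator",
--     "aegisforge-admins": "admin",
--     "aegisforge-super-admins": "super-admin",
-- }
--
-- def resolve_role_from_groups(
--     groups: list[str],
--     group_role_map: dict[str, str] | None = None,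
-- ) -> str:
--     """Resolve the highest role from a user's IdP group memberships."""
--     mapping = group_role_map or DEFAULT_GROUP_ROLE_MAP
--     present = {mapping.get(g) for g in groups}
--     for role in ("super-admin", "admin", "operator"):
--         if role in present:
--             return role
--     return "viewer"
-- ===== Notes on version B (the rewrite author's own statement) =====
-- stated objective: simpler
-- what changed: Instead of tracking a running maximum rank over the groups, B builds the set of roles the user's groups map to in one pass and then walks the fixed hierarchy from highest to lowest, returning the first role present (default 'viewer').
import Mathlib
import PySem

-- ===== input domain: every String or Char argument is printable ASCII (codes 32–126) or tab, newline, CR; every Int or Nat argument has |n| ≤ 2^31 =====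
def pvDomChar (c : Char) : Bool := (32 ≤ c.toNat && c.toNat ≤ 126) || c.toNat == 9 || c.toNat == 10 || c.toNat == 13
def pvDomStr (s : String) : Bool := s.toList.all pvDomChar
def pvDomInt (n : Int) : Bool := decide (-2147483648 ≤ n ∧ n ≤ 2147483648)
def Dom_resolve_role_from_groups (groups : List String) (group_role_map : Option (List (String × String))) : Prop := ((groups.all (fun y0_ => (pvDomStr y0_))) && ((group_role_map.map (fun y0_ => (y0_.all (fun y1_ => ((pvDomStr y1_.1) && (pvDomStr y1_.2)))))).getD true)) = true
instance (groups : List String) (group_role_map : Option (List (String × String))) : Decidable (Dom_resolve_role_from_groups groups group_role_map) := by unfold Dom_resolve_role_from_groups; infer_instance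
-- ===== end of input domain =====

-- B replaces A's running-maximum over the groups by a one-pass role set plus a
-- top-down scan of the fixed hierarchy (objective: simpler decomposition).

-- shared module constant (the Python module-level DEFAULT_GROUP_ROLE_MAP)
def pvDefaultGroupRoleMap : List (String × String) :=
  [("aegisforge-viewers", "viewer"), ("aegisforge-operators", "operator"),
   ("aegisforge-admins", "admin"), ("aegisforge-super-admins", "super-admin")]

-- `mapping = group_role_map or DEFAULT_GROUP_ROLE_MAP` (empty dict is falsy)
def pvMapping (group_role_map : Option (List (String × String))) : List (String × String) :=
  match group_role_map with
  | none => pvDefaultGroupRoleMap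
  | some m => if m = [] then pvDefaultGroupRoleMap else m

-- `mapping.get(g)` on the association list (first match)
def pvGetRole (m : List (String × String)) (g : String) : Option String :=
  (PySem.Dict.mk m).get? g

-- ===== PORT A =====
-- role_hierarchy.get(r, -1)
def pvRank (r : String) : Int :=
  PySem.Dict.getD (PySem.Dict.mk [("viewer", (0 : Int)), ("operator", 1), ("admin", 2), ("super-admin", 3)]) r (-1)

-- one iteration of A's loop body
def pvStepA (mapping : List (String × String)) (highest_role group : String) : String :=
  match pvGetRole mapping group with
  | none => highest_role
  | some role =>
    if role ≠ "" ∧ pvRank role > pvRank highest_role then role else highest_role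

def resolve_role_from_groups (groups : List String) (group_role_map : Option (List (String × String))) : String :=
  let mapping := pvMapping group_role_map
  groups.foldl (pvStepA mapping) "viewer"

-- ===== PORT B =====
def resolve_role_from_groups_alt (groups : List String) (group_role_map : Option (List (String × String))) : String :=
  let mapping := pvMapping group_role_map
  let present : PySem.Set (Option String) := PySem.Set.ofList (groups.map (fun g => pvGetRole mapping g))
  if PySem.Set.contains present (some "super-admin") then "super-admin"
  else if PySem.Set.contains present (some "admin") then "admin"
  else if PySem.Set.contains present (some "operator") then "operator"
  else "viewer"

-- ===== PRECONDITION & SPEC =====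
def Spec_resolve_role_from_groups (groups : List String) (group_role_map : Option (List (String × String))) (out : String) : Prop := out = resolve_role_from_groups_alt groups group_role_map
instance (groups : List String) (group_role_map : Option (List (String × String))) (out : String) : Decidable (Spec_resolve_role_from_groups groups group_role_map out) := by unfold Spec_resolve_role_from_groups; infer_instance

-- ===== CLAIM (what is proved, stated in full; the proofs are below) =====
def Claim_equal_resolve_role_from_groups : Prop := ∀ (groups : List String) (group_role_map : Option (List (String × String))), Dom_resolve_role_from_groups groups group_role_map → Spec_resolve_role_from_groups groups group_role_map (resolve_role_from_groups groups group_role_map)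

-- ===== LEMMAS AND PROOFS =====

-- whether some group maps (via first-match lookup) to the given role
def pvHas (m : List (String × String)) (gs : List String) (r : String) : Bool :=
  gs.any (fun g => pvGetRole m g == some r)

theorem pvHas_cons (m : List (String × String)) (g : String) (gs : List String) (r : String) :
    pvHas m (g :: gs) r = ((pvGetRole m g == some r) || pvHas m gs r) := by
  simp [pvHas]

theorem pvRank_other (role : String) (h0 : ¬ role = "viewer") (h1 : ¬ role = "operator")
    (h2 : ¬ role = "admin") (h3 : ¬ role = "super-admin") : pvRank role = -1 := by
  simp [pvRank, PySem.Dict.getD_eq_get?_getD, PySem.Dict.get?, beq_iff_eq,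
    Ne.symm h0, Ne.symm h1, Ne.symm h2, Ne.symm h3]

theorem pvStepA_some (m : List (String × String)) (h g role : String)
    (hg : pvGetRole m g = some role) :
    pvStepA m h g = if role ≠ "" ∧ pvRank role > pvRank h then role else h := by
  simp [pvStepA, hg]

theorem pvStepA_none (m : List (String × String)) (h g : String)
    (hg : pvGetRole m g = none) : pvStepA m h g = h := by
  simp [pvStepA, hg]

-- characterization of A's fold from any of the four reachable accumulator states
theorem foldA_char (m : List (String × String)) (gs : List String) (h : String)
    (hh : h = "viewer" ∨ h = "operator" ∨ h = "admin" ∨ h = "super-admin") :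
    gs.foldl (pvStepA m) h =
    (if pvHas m gs "super-admin" || (h == "super-admin") then "super-admin"
     else if pvHas m gs "admin" || (h == "admin") then "admin"
     else if pvHas m gs "operator" || (h == "operator") then "operator"
     else h) := by
  induction gs generalizing h with
  | nil =>
    rcases hh with rfl | rfl | rfl | rfl <;> simp [pvHas]
  | cons g gs ih =>
    simp only [List.foldl_cons, pvHas_cons]
    rcases hg : pvGetRole m g with _ | role
    · rw [pvStepA_none m h g hg, ih h hh]; simp
    · rw [pvStepA_some m h g role hg]
      by_cases e3 : role = "super-admin"
      · subst e3
        rcases hh with rfl | rfl | rfl | rfl <;>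
          first
          | (rw [if_pos (by decide), ih _ (by tauto)]; simp)
          | (rw [if_neg (by decide), ih _ (by tauto)]; simp)
      · by_cases e2 : role = "admin"
        · subst e2
          rcases hh with rfl | rfl | rfl | rfl <;>
            first
            | (rw [if_pos (by decide), ih _ (by tauto)]; simp)
            | (rw [if_neg (by decide), ih _ (by tauto)]; simp)
        · by_cases e1 : role = "operator"
          · subst e1
            rcases hh with rfl | rfl | rfl | rfl <;>
              first
              | (rw [if_pos (by decide), ih _ (by tauto)]; simp)
              | (rw [if_neg (by decide), ih _ (by tauto)]; simp)
          · by_cases e0 : role = "viewer"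
            · subst e0
              rcases hh with rfl | rfl | rfl | rfl <;>
                (rw [if_neg (by decide), ih _ (by tauto)]; simp)
            · have hr : pvRank role = -1 := pvRank_other role e0 e1 e2 e3
              have hcond : ¬ (role ≠ "" ∧ pvRank role > pvRank h) := by
                rintro ⟨-, hgt⟩
                rw [hr] at hgt
                rcases hh with rfl | rfl | rfl | rfl <;> revert hgt <;> decide
              rw [if_neg hcond, ih h hh]
              simp [e3, e2, e1]

theorem contains_ofList_map (gs : List String) (f : String → Option String) (r : Option String) :
    PySem.Set.contains (PySem.Set.ofList (gs.map f)) r = gs.any (fun g => f g == r) := by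
  rw [Bool.eq_iff_iff]
  simp [PySem.Set.contains, PySem.Set.mem_ofList, List.any_eq_true]

-- ===== VERDICT (by name: the statement is the Claim_ definition above) =====
theorem resolve_role_from_groups_spec : Claim_equal_resolve_role_from_groups := by
  intro groups gm _
  show resolve_role_from_groups groups gm = resolve_role_from_groups_alt groups gm
  simp only [resolve_role_from_groups, resolve_role_from_groups_alt]
  rw [foldA_char (pvMapping gm) groups "viewer" (Or.inl rfl),
    contains_ofList_map, contains_ofList_map, contains_ofList_map]
  simp [pvHas]
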